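-- pv_equiv track=rewrite | github.com/Mr-SUBRATA/TravelMate | TravelMate/backend/ml-service/app/core/group_harmony.py | _calculate_priority_distribution
-- ===== SOURCE A (Python) =====
-- from typing import List, Dict, Optional, Tuple
--
-- def _calculate_priority_distribution(
--                                     itinerary: List[Dict],
--                                     users: List[Dict]) -> Dict:
--     """
--     Calculate who got priority on which days
--     """
--     distribution = {user['name']: 0 for user in users}
--
--     for day in itinerary:
--         priority_user = day.get('priority_user')
--         if priority_user in distribution:
--             distribution[priority_user] += 1
--
--     return distribution
-- ===== SOURCE B (Python) =====
-- def _calculate_priority_distribution(itinerary, users):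
--     # Per-user brute-force scan: for each user, count matching days directly.
--     return {user['name']: sum(1 for day in itinerary
--                               if day.get('priority_user') == user['name'])
--             for user in users}
-- ===== Notes on version B (the rewrite author's own statement) =====
-- stated objective: alternative
-- what changed: B drops A's tallying dict entirely: for each user it scans the itinerary and counts days whose priority_user equals that name (nested brute-force scan, O(u*i)), instead of A's zero-initialised dict incremented in one itinerary pass.
import Mathlib
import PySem

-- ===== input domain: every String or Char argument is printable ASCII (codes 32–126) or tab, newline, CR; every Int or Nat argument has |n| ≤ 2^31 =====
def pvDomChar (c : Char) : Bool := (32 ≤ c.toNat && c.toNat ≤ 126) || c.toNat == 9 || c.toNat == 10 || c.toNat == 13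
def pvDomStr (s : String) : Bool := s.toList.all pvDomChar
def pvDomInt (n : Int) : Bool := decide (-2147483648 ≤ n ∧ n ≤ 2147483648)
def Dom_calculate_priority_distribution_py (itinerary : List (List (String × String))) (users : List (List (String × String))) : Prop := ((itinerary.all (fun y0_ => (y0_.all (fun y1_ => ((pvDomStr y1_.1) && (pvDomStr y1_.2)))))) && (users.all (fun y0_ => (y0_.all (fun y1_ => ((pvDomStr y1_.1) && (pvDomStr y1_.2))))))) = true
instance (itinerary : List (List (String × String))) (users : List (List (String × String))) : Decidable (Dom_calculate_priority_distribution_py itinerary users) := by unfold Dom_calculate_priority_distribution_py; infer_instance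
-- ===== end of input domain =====

-- B replaces A's tallying dict with a per-user brute-force scan of the itinerary (alternative
-- algorithm, O(u*i) instead of O(u+i)); return-value equivalence only.
-- dict.get / dict[k] on the input association lists = first-match lookup via PySem.Dict.mk.
def pvGet (d : List (String × String)) (k : String) : Option String := (PySem.Dict.mk d).get? k

-- user['name']; the .getD "" is unreachable under Pre_ (every user dict contains "name").
def pvName (u : List (String × String)) : String := (pvGet u "name").getD ""

-- the body of A's `for day in itinerary` loop
def pvStepA (d : PySem.Dict String Int) (day : List (String × String)) : PySem.Dict String Int :=
  match pvGet day "priority_user" with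
  | some p => if d.contains p then d.modify p 0 (· + 1) else d
  | none => d

-- ===== PORT A =====
def calculate_priority_distribution_py (itinerary : List (List (String × String))) (users : List (List (String × String))) : List (String × Int) :=
  let distribution : PySem.Dict String Int :=
    users.foldl (fun d u => d.insert (pvName u) 0) PySem.Dict.empty
  (itinerary.foldl pvStepA distribution).items

-- ===== PORT B =====
-- B's inner sum(1 for day in itinerary if day.get('priority_user') == user['name'])
def pvCountB (itinerary : List (List (String × String))) (k : String) : Int :=
  itinerary.foldl (fun acc day => if pvGet day "priority_user" == some k then acc + 1 else acc) 0

def calculate_priority_distribution_py_alt (itinerary : List (List (String × String))) (users : List (List (String × String))) : List (String × Int) :=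
  (users.foldl (fun d u => d.insert (pvName u) (pvCountB itinerary (pvName u))) PySem.Dict.empty).items

-- ===== PRECONDITION & SPEC =====
-- Pre_ excludes exactly the inputs where A raises KeyError: a user dict without a 'name' key.
def Pre_calculate_priority_distribution_py (_itinerary : List (List (String × String))) (users : List (List (String × String))) : Prop :=
  ∀ u ∈ users, (pvGet u "name").isSome = true
instance (itinerary : List (List (String × String))) (users : List (List (String × String))) : Decidable (Pre_calculate_priority_distribution_py itinerary users) := by unfold Pre_calculate_priority_distribution_py; infer_instance

def pvWitness_calculate_priority_distribution_py : (List (List (String × String))) × (List (List (String × String))) :=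
  ([[("priority_user", "amy")], [("priority_user", "bob")], []], [[("name", "amy")], [("name", "cat")]])

def Spec_calculate_priority_distribution_py (itinerary : List (List (String × String))) (users : List (List (String × String))) (out : List (String × Int)) : Prop := out = calculate_priority_distribution_py_alt itinerary users
instance (itinerary : List (List (String × String))) (users : List (List (String × String))) (out : List (String × Int)) : Decidable (Spec_calculate_priority_distribution_py itinerary users out) := by unfold Spec_calculate_priority_distribution_py; infer_instance

-- ===== CLAIM (what is proved, stated in full; the proofs are below) =====
def Claim_equal_calculate_priority_distribution_py : Prop := ∀ (itinerary : List (List (String × String))) (users : List (List (String × String))), Dom_calculate_priority_distribution_py itinerary users → Pre_calculate_priority_distribution_py itinerary users → Spec_calculate_priority_distribution_py itinerary users (calculate_priority_distribution_py itinerary users)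

-- ===== LEMMAS AND PROOFS =====

lemma pvStepA_none {day : List (String × String)} (h : pvGet day "priority_user" = none)
    (d : PySem.Dict String Int) : pvStepA d day = d := by
  simp [pvStepA, h]

lemma pvStepA_some {day : List (String × String)} {p : String}
    (h : pvGet day "priority_user" = some p) (d : PySem.Dict String Int) :
    pvStepA d day = if d.contains p then d.modify p 0 (· + 1) else d := by
  simp [pvStepA, h]

-- A's itinerary loop never changes the key list.
lemma keys_loopA (itinerary : List (List (String × String))) (d : PySem.Dict String Int) :
    (itinerary.foldl pvStepA d).keys = d.keys := by
  induction itinerary generalizing d with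
  | nil => rfl
  | cons day rest ih =>
    simp only [List.foldl_cons]
    rw [ih]
    cases hday : pvGet day "priority_user" with
    | none => rw [pvStepA_none hday]
    | some p =>
      rw [pvStepA_some hday]
      by_cases h : d.contains p = true
      · rw [if_pos h, PySem.Dict.keys_modify]
        exact PySem.Dict.keys_insert_of_contains _ _ h
      · rw [if_neg h]

-- A's itinerary loop, read at a present key, adds the number of days whose priority is that key.
lemma getD_loopA (itinerary : List (List (String × String))) (d : PySem.Dict String Int)
    (k : String) (hk : d.contains k = true) :
    (itinerary.foldl pvStepA d).getD k 0
    = d.getD k 0 + ((itinerary.map (fun day => pvGet day "priority_user")).count (some k) : Int) := by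
  induction itinerary generalizing d with
  | nil => simp
  | cons day rest ih =>
    simp only [List.foldl_cons, List.map_cons, List.count_cons]
    cases hday : pvGet day "priority_user" with
    | none =>
      rw [pvStepA_none hday, ih d hk]
      simp
    | some p =>
      rw [pvStepA_some hday]
      by_cases hc : d.contains p = true
      · rw [if_pos hc, ih _ (by rw [PySem.Dict.contains_modify]; simp [hk]),
            PySem.Dict.getD_modify]
        by_cases hpk : k = p
        · subst hpk
          simp only [beq_self_eq_true, if_true]
          push_cast; ring
        · rw [if_neg hpk]
          have : (some p == some k) = false := by
            simp [beq_eq_false_iff_ne]; exact fun h => hpk h.symm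
          simp [this]
      · rw [if_neg hc, ih d hk]
        have hpk : ¬ k = p := fun h => hc (h ▸ hk)
        have : (some p == some k) = false := by
          simp [beq_eq_false_iff_ne]; exact fun h => hpk h.symm
        simp [this]

-- zero-initialisation: every lookup in A's initial dict is 0.
lemma getD_init (users : List (List (String × String))) (d : PySem.Dict String Int)
    (hd : ∀ k, d.getD k 0 = 0) (k : String) :
    (users.foldl (fun d u => d.insert (pvName u) 0) d).getD k 0 = 0 := by
  induction users generalizing d with
  | nil => exact hd k
  | cons u rest ih =>
    simp only [List.foldl_cons]
    exact ih _ (fun j => by rw [PySem.Dict.getD_insert]; split <;> simp [hd])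

-- B's inner scan counts the itinerary entries whose priority_user equals k.
lemma pvCountB_eq_count (itinerary : List (List (String × String))) (k : String) :
    pvCountB itinerary k
    = ((itinerary.map (fun day => pvGet day "priority_user")).count (some k) : Int) := by
  unfold pvCountB
  induction itinerary with
  | nil => simp
  | cons day rest ih =>
    simp only [List.foldl_cons, List.map_cons, List.count_cons]
    by_cases h : pvGet day "priority_user" = some k
    · have hfold : ∀ (l : List (List (String × String))) (a : Int),
          l.foldl (fun acc day => if pvGet day "priority_user" == some k then acc + 1 else acc) a
          = a + l.foldl (fun acc day => if pvGet day "priority_user" == some k then acc + 1 else acc) 0 := by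
        intro l
        induction l with
        | nil => simp
        | cons x xs ihx =>
          intro a
          simp only [List.foldl_cons]
          by_cases hx : pvGet x "priority_user" == some k
          · rw [if_pos hx, if_pos hx, ihx (a+1), ihx (0+1)]; ring
          · rw [if_neg hx, if_neg hx]; exact ihx a
      simp only [h, beq_self_eq_true, if_true]
      rw [hfold rest (0+1), ih]
      push_cast; ring
    · have : (pvGet day "priority_user" == some k) = false := by
        simp [beq_eq_false_iff_ne]; exact h
      simp only [this]
      simpa using ih

-- B's users loop, read at any key: g of that key if it is some user's name, else unchanged.
lemma getD_loopB (users : List (List (String × String))) (g : String → Int)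
    (d : PySem.Dict String Int) (k : String) :
    (users.foldl (fun d u => d.insert (pvName u) (g (pvName u))) d).getD k 0
    = if k ∈ users.map pvName then g k else d.getD k 0 := by
  induction users generalizing d with
  | nil => simp
  | cons u rest ih =>
    simp only [List.foldl_cons, List.map_cons, List.mem_cons]
    rw [ih]
    by_cases hmem : k ∈ rest.map pvName
    · simp [hmem]
    · rw [PySem.Dict.getD_insert]
      by_cases he : k = pvName u <;> simp [he, hmem]

-- ===== VERDICT (by name: the statement is the Claim_ definition above) =====
theorem calculate_priority_distribution_py_spec : Claim_equal_calculate_priority_distribution_py := by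
  intro itinerary users _ _
  unfold Spec_calculate_priority_distribution_py
  simp only [calculate_priority_distribution_py, calculate_priority_distribution_py_alt]
  set dist0 : PySem.Dict String Int :=
    users.foldl (fun d u => d.insert (pvName u) 0) PySem.Dict.empty with hdist0
  set dB : PySem.Dict String Int :=
    users.foldl (fun d u => d.insert (pvName u) (pvCountB itinerary (pvName u))) PySem.Dict.empty with hdB
  set dA : PySem.Dict String Int := itinerary.foldl pvStepA dist0 with hdA
  have hkeys0 : dist0.keys = PySem.Set.update (PySem.Dict.empty : PySem.Dict String Int).keys (users.map pvName) := by
    rw [hdist0]; exact PySem.Dict.keys_foldl_insert_key users pvName _ _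
  have hkeysB : dB.keys = dist0.keys := by
    rw [hdB, hkeys0]; exact PySem.Dict.keys_foldl_insert_key users pvName _ _
  have hkeysA : dA.keys = dist0.keys := keys_loopA itinerary dist0
  have hnd0 : dist0.keys.Nodup :=
    PySem.Dict.nodup_keys_foldl_insert_key users pvName _ _ PySem.Dict.nodup_keys_empty
  have hndA : dA.keys.Nodup := hkeysA ▸ hnd0
  have hndB : dB.keys.Nodup := hkeysB ▸ hnd0
  have hmem : ∀ k ∈ dist0.keys, k ∈ users.map pvName := by
    intro k hk
    rw [hkeys0] at hk
    rcases (PySem.Set.mem_update _ _ _).mp hk with h | h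
    · simpa using h
    · exact h
  rw [PySem.Dict.items_eq_map_keys dA hndA 0, PySem.Dict.items_eq_map_keys dB hndB 0,
      hkeysA, hkeysB]
  apply List.map_congr_left
  intro k hk
  have hcont : dist0.contains k = true := by
    rw [PySem.Dict.contains_iff_mem_keys]; exact hk
  have hA : dA.getD k 0 = ((itinerary.map (fun day => pvGet day "priority_user")).count (some k) : Int) := by
    rw [hdA, getD_loopA itinerary dist0 k hcont, getD_init users PySem.Dict.empty (fun j => PySem.Dict.getD_empty _ _) k]
    ring
  have hB : dB.getD k 0 = pvCountB itinerary k := by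
    rw [hdB, getD_loopB users (fun n => pvCountB itinerary n) PySem.Dict.empty k]
    simp [hmem k hk]
  rw [hA, hB, pvCountB_eq_count]
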